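-- pv_equiv track=rewrite | github.com/PavithraSjai/PAT-batch-23-Task14 | brewery.py | count_brewery_types_by_city
-- ===== SOURCE A (Python) =====
-- def count_brewery_types_by_city(filtered_breweries):
--     city_brewery_types = {}
--     for brewery in filtered_breweries:
--         city = brewery['city']
--         brewery_type = brewery['brewery_type']
--         city_brewery_types[city] = city_brewery_types.get(city, {})
--         city_brewery_types[city][brewery_type] = city_brewery_types[city].get(brewery_type, 0) + 1
--     return city_brewery_types
-- ===== SOURCE B (Python) =====
-- def count_brewery_types_by_city(filtered_breweries):
--     # pass 1: group the brewery_type values by city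
--     groups = {}
--     for brewery in filtered_breweries:
--         groups.setdefault(brewery['city'], []).append(brewery['brewery_type'])
--     # pass 2: turn each city's list of types into a frequency dict
--     result = {}
--     for city, types in groups.items():
--         counts = {}
--         for t in types:
--             counts[t] = counts.get(t, 0) + 1
--         result[city] = counts
--     return result
-- ===== Notes on version B (the rewrite author's own statement) =====
-- stated objective: alternative
-- what changed: A's single incremental nested-count pass is split into a grouping pass (city -> list of brewery_type values via setdefault/append) followed by a per-group counting pass that builds each city's frequency dict.
import Mathlib
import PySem

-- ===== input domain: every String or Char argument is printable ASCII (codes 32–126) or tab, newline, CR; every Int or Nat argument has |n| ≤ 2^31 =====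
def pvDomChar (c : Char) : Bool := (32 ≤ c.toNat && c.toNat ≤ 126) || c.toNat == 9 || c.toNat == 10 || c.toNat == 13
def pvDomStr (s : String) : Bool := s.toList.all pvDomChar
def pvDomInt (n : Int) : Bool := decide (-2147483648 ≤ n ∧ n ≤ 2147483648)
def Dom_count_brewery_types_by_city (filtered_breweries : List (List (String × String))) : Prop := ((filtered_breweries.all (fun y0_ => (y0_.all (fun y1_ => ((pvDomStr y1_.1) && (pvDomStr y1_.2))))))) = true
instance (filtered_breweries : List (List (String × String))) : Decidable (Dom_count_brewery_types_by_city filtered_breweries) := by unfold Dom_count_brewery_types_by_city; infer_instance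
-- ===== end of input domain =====

-- B splits A's single incremental nested-count pass into a grouping pass (city -> list of types)
-- followed by a per-group counting pass; same return value, same O(n) cost (objective: alternative).


-- brewery[k]: first-match association-list lookup (the convention for a Python dict argument);
-- total form with default "", used only under Pre_ (key present, so the default is never taken)
def pvLook (b : List (String × String)) (k : String) : String := (b.lookup k).getD ""

-- ===== PORT A =====
-- one pass; 'city_brewery_types[city] = …get(city, {})' followed by the in-place increment of
-- that same entry is the single insert of the incremented inner dict
def count_brewery_types_by_city (filtered_breweries : List (List (String × String))) : List (String × List (String × Int)) :=
  ((filtered_breweries.foldl (fun d brewery =>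
      let city := pvLook brewery "city"
      let brewery_type := pvLook brewery "brewery_type"
      let inner := d.getD city PySem.Dict.empty
      d.insert city (inner.insert brewery_type (inner.getD brewery_type 0 + 1)))
    (PySem.Dict.empty : PySem.Dict String (PySem.Dict String Int))).items).map
    (fun p => (p.1, p.2.items))

-- ===== PORT B =====
-- pass 1: 'groups.setdefault(city, []).append(t)' is modify with default [];
-- pass 2: per-group counting loop building the frequency dict
def count_brewery_types_by_city_alt (filtered_breweries : List (List (String × String))) : List (String × List (String × Int)) :=
  ((filtered_breweries.foldl (fun g brewery =>
      g.modify (pvLook brewery "city") [] (· ++ [pvLook brewery "brewery_type"]))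
    (PySem.Dict.empty : PySem.Dict String (List String))).items).map (fun p =>
    (p.1, (p.2.foldl (fun c t => c.insert t (c.getD t 0 + 1))
             (PySem.Dict.empty : PySem.Dict String Int)).items))

-- ===== PRECONDITION & SPEC =====
-- Pre_: every brewery dict has the keys 'city' and 'brewery_type'; on a brewery missing one, A raises KeyError
def Pre_count_brewery_types_by_city (filtered_breweries : List (List (String × String))) : Prop :=
  ∀ b ∈ filtered_breweries, "city" ∈ b.map Prod.fst ∧ "brewery_type" ∈ b.map Prod.fst
instance (filtered_breweries : List (List (String × String))) : Decidable (Pre_count_brewery_types_by_city filtered_breweries) := by unfold Pre_count_brewery_types_by_city; infer_instance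
def pvWitness_count_brewery_types_by_city : (List (List (String × String))) :=
  [[("city", "Austin"), ("brewery_type", "micro")], [("city", "Austin"), ("brewery_type", "nano")]]

def Spec_count_brewery_types_by_city (filtered_breweries : List (List (String × String))) (out : List (String × List (String × Int))) : Prop := out = count_brewery_types_by_city_alt filtered_breweries
instance (filtered_breweries : List (List (String × String))) (out : List (String × List (String × Int))) : Decidable (Spec_count_brewery_types_by_city filtered_breweries out) := by unfold Spec_count_brewery_types_by_city; infer_instance

-- ===== CLAIM (what is proved, stated in full; the proofs are below) =====
def Claim_equal_count_brewery_types_by_city : Prop := ∀ (filtered_breweries : List (List (String × String))), Dom_count_brewery_types_by_city filtered_breweries → Pre_count_brewery_types_by_city filtered_breweries → Spec_count_brewery_types_by_city filtered_breweries (count_brewery_types_by_city filtered_breweries)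

-- ===== LEMMAS AND PROOFS =====

-- abbreviations for the two field accesses (proof-side only)
def pvCity (b : List (String × String)) : String := pvLook b "city"
def pvType (b : List (String × String)) : String := pvLook b "brewery_type"

-- A's outer fold, looked up at one city, is the counting fold over that city's type list
lemma A_fold_getD (fb : List (List (String × String)))
    (d : PySem.Dict String (PySem.Dict String Int)) (c : String) :
    (fb.foldl (fun d brewery =>
        let city := pvLook brewery "city"
        let brewery_type := pvLook brewery "brewery_type"
        let inner := d.getD city PySem.Dict.empty
        d.insert city (inner.insert brewery_type (inner.getD brewery_type 0 + 1))) d).getD c PySem.Dict.empty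
      = ((fb.filter (fun b => pvCity b == c)).map pvType).foldl
          (fun cnt t => cnt.insert t (cnt.getD t 0 + 1)) (d.getD c PySem.Dict.empty) := by
  induction fb generalizing d with
  | nil => rfl
  | cons b fb ih =>
    rw [List.foldl_cons, ih, List.filter_cons]
    by_cases h : pvLook b "city" = c
    · simp [pvCity, pvType, h]
    · simp [pvCity, PySem.Dict.getD_insert, h, Ne.symm h]

-- B's grouping fold, looked up at one city, is that city's type list
lemma B_groups_getD (fb : List (List (String × String))) (c : String) :
    ((fb.foldl (fun g brewery =>
        g.modify (pvLook brewery "city") [] (· ++ [pvLook brewery "brewery_type"]))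
      (PySem.Dict.empty : PySem.Dict String (List String))).getD c [])
      = (fb.filter (fun b => pvCity b == c)).map pvType := by
  have h := PySem.Dict.getD_foldl_modify_append
    (l := fb.map (fun b => (pvCity b, pvType b)))
    (d := (PySem.Dict.empty : PySem.Dict String (List String))) (c := c)
  rw [List.foldl_map] at h
  simpa [pvCity, pvType, List.filter_map, Function.comp] using h

-- the two folds produce dictionaries with the same key list
lemma keys_eq (fb : List (List (String × String))) :
    (fb.foldl (fun d brewery =>
        let city := pvLook brewery "city"
        let brewery_type := pvLook brewery "brewery_type"
        let inner := d.getD city PySem.Dict.empty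
        d.insert city (inner.insert brewery_type (inner.getD brewery_type 0 + 1)))
      (PySem.Dict.empty : PySem.Dict String (PySem.Dict String Int))).keys
    = (fb.foldl (fun g brewery =>
        g.modify (pvLook brewery "city") [] (· ++ [pvLook brewery "brewery_type"]))
      (PySem.Dict.empty : PySem.Dict String (List String))).keys := by
  rw [PySem.Dict.keys_foldl_insert_key (key := fun b => pvLook b "city"),
      PySem.Dict.keys_foldl_modify_key (key := fun b => pvLook b "city")]
  rfl

-- ===== VERDICT (by name: the statement is the Claim_ definition above) =====
theorem count_brewery_types_by_city_spec : Claim_equal_count_brewery_types_by_city := by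
  intro fb _ _
  unfold Spec_count_brewery_types_by_city count_brewery_types_by_city count_brewery_types_by_city_alt
  have hndA : (fb.foldl (fun d brewery =>
      let city := pvLook brewery "city"
      let brewery_type := pvLook brewery "brewery_type"
      let inner := d.getD city PySem.Dict.empty
      d.insert city (inner.insert brewery_type (inner.getD brewery_type 0 + 1)))
      (PySem.Dict.empty : PySem.Dict String (PySem.Dict String Int))).keys.Nodup :=
    PySem.Dict.nodup_keys_foldl_insert_key fb (fun b => pvLook b "city") _ _
      PySem.Dict.nodup_keys_empty
  have hndB : (fb.foldl (fun g brewery =>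
      g.modify (pvLook brewery "city") [] (· ++ [pvLook brewery "brewery_type"]))
      (PySem.Dict.empty : PySem.Dict String (List String))).keys.Nodup :=
    PySem.Dict.nodup_keys_foldl_modify_key fb (fun b => pvLook b "city") _ _ _
      PySem.Dict.nodup_keys_empty
  rw [PySem.Dict.items_eq_map_keys _ hndA PySem.Dict.empty,
      PySem.Dict.items_eq_map_keys _ hndB [], keys_eq, List.map_map, List.map_map]
  apply List.map_congr_left
  intro c _
  simp only [Function.comp_apply]
  rw [A_fold_getD, B_groups_getD]
  simp [PySem.Dict.getD_empty]
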